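-- pv_equiv track=rewrite | github.com/saramaskour05-stack/data-structures-python | recursion_examples.py | count_file
-- ===== SOURCE A (Python) =====
-- def count_file(lines, i=0):
--     if not lines or i >= len(lines):
--         return 0, 0
--
--     numbers = [int(x) for x in lines[i].split() if x.isdigit()]
--     line_count = 1 if numbers else 0
--     line_sum = sum(numbers)
--
--     next_sum, next_count = count_file(lines, i + 1)
--     return next_sum + line_sum, next_count + line_count
-- ===== SOURCE B (Python) =====
-- def count_file(lines, i=0):
--     # iterative single pass from index i; B returns the same (sum, count) as A
--     if not lines:
--         return 0, 0
--     total = 0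
--     count = 0
--     for idx in range(i, len(lines)):
--         line_sum = 0
--         found = False
--         for tok in lines[idx].split():
--             if tok.isdigit():
--                 line_sum += int(tok)
--                 found = True
--         total += line_sum
--         if found:
--             count += 1
--     return total, count
-- ===== Notes on version B (the rewrite author's own statement) =====
-- stated objective: idiomatic
-- what changed: Replaces the tail recursion plus per-line comprehension-and-sum with a single iterative loop over range(i, len(lines)) that accumulates the running sum and count in one pass per token, without building the intermediate numbers list.
-- outside the precondition, e.g. on count_file(['1'], -2): A raises IndexError, B raises IndexError
import Mathlib
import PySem

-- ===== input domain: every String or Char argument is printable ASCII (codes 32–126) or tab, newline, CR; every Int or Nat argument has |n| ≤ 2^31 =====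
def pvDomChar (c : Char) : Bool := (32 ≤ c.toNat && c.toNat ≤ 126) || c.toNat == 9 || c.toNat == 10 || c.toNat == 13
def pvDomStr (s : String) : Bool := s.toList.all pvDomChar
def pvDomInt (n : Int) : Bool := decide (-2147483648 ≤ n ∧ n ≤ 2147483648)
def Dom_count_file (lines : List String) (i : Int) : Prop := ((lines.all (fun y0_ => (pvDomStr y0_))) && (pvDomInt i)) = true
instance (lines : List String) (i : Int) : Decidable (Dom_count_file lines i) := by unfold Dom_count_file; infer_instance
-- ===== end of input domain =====

-- B is an iterative single pass (loop over range(i, len) with running totals) instead of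
-- A's tail recursion with a per-line comprehension list; same return value everywhere A returns.

-- ===== PORT A =====
-- A, literally: base case guard, comprehension+sum for the line at i, recurse on i+1.
def count_file (lines : List String) (i : Int) : Int × Int :=
  if lines = [] ∨ i ≥ (lines.length : Int) then (0, 0)
  else
    let line := PySem.List.pyGetD lines i ""          -- lines[i]; Pre_ guarantees in range
    let numbers := ((PySem.Str.split₀ line).filter (fun x => PySem.Str.strIsdigit x)).map
      (fun x => (PySem.Int.ofStr? x).getD 0)          -- int(x); x.isdigit() ⇒ parses
    let line_count : Int := if numbers ≠ [] then 1 else 0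
    let line_sum : Int := numbers.sum
    let next := count_file lines (i + 1)
    (next.1 + line_sum, next.2 + line_count)
  termination_by ((lines.length : Int) - i).toNat
  decreasing_by omega

-- ===== PORT B =====
-- inner token loop of B: running (line_sum, found-a-number flag)
def cfTok (p : Int × Bool) (tok : String) : Int × Bool :=
  if PySem.Str.strIsdigit tok then (p.1 + (PySem.Int.ofStr? tok).getD 0, true) else p

-- outer loop body of B: fold one line index into the running (total, count)
def cfLine (lines : List String) (acc : Int × Int) (idx : Int) : Int × Int :=
  let sf := (PySem.Str.split₀ (PySem.List.pyGetD lines idx "")).foldl cfTok (0, false)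
  (acc.1 + sf.1, acc.2 + if sf.2 then 1 else 0)

def count_file_alt (lines : List String) (i : Int) : Int × Int :=
  if lines = [] then (0, 0)
  else (PySem.List.pyRange i (lines.length : Int) 1).foldl (cfLine lines) (0, 0)

-- ===== PRECONDITION & SPEC =====
-- Pre_ excludes exactly the inputs where A raises IndexError: nonempty lines with i < -len(lines).
def Pre_count_file (lines : List String) (i : Int) : Prop :=
  lines = [] ∨ -(lines.length : Int) ≤ i
instance (lines : List String) (i : Int) : Decidable (Pre_count_file lines i) := by
  unfold Pre_count_file; infer_instance

def pvWitness_count_file : List String × Int := (["1 2 x", "", "abc 3"], 0)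

def Spec_count_file (lines : List String) (i : Int) (out : Int × Int) : Prop := out = count_file_alt lines i
instance (lines : List String) (i : Int) (out : Int × Int) : Decidable (Spec_count_file lines i out) := by unfold Spec_count_file; infer_instance

-- ===== CLAIM (what is proved, stated in full; the proofs are below) =====
def Claim_equal_count_file : Prop := ∀ (lines : List String) (i : Int), Dom_count_file lines i → Pre_count_file lines i → Spec_count_file lines i (count_file lines i)

-- ===== LEMMAS AND PROOFS =====

-- the token fold of B computes (p + sum of parsed digit-tokens, q || some digit-token exists)
theorem cfTok_spec (ts : List String) (p : Int) (q : Bool) :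
    ts.foldl cfTok (p, q) =
      (p + (((ts.filter (fun x => PySem.Str.strIsdigit x)).map (fun x => (PySem.Int.ofStr? x).getD 0)).sum),
       q || !((ts.filter (fun x => PySem.Str.strIsdigit x)).isEmpty)) := by
  induction ts generalizing p q with
  | nil => simp
  | cons t ts ih =>
    rw [List.foldl_cons]
    cases hb : PySem.Chars.strIsdigit t.toList with
    | false =>
      have hstep : cfTok (p, q) t = (p, q) := by simp [cfTok, hb]
      rw [hstep, ih]
      simp [hb]
    | true =>
      have hstep : cfTok (p, q) t = (p + (PySem.Int.ofStr? t).getD 0, true) := by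
        simp [cfTok, hb]
      rw [hstep, ih]
      simp only [Prod.mk.injEq]
      constructor
      · simp [hb]; ring
      · simp [hb]

-- one step of B's outer loop equals A's per-line contribution
theorem cfLine_spec (lines : List String) (acc : Int × Int) (idx : Int) :
    cfLine lines acc idx =
      (acc.1 + (((PySem.Str.split₀ (PySem.List.pyGetD lines idx "")).filter (fun x => PySem.Str.strIsdigit x)).map
                  (fun x => (PySem.Int.ofStr? x).getD 0)).sum,
       acc.2 + if ((PySem.Str.split₀ (PySem.List.pyGetD lines idx "")).filter (fun x => PySem.Str.strIsdigit x)).isEmpty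
               then 0 else 1) := by
  simp only [cfLine, cfTok_spec]
  cases ((PySem.Str.split₀ (PySem.List.pyGetD lines idx "")).filter (fun x => PySem.Str.strIsdigit x)).isEmpty <;> simp

-- B's fold from any accumulator adds exactly A's recursive result (nonempty lines)
theorem cf_main (lines : List String) (hne0 : lines ≠ []) (i a b : Int) :
    (PySem.List.pyRange i (lines.length : Int) 1).foldl (cfLine lines) (a, b) =
      (a + (count_file lines i).1, b + (count_file lines i).2) := by
  by_cases hge : (lines.length : Int) ≤ i
  · rw [PySem.List.pyRange_one_eq_nil hge]
    conv_rhs => rw [count_file]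
    rw [if_pos (Or.inr hge)]
    simp
  · have hlt : i < (lines.length : Int) := lt_of_not_ge hge
    have hcond : ¬ (lines = [] ∨ i ≥ (lines.length : Int)) := by
      rintro (h | h)
      · exact hne0 h
      · exact hge h
    conv_rhs => rw [count_file]
    rw [if_neg hcond, PySem.List.pyRange_one_cons hlt, List.foldl_cons, cfLine_spec,
        cf_main lines hne0 (i + 1)]
    simp only [Prod.mk.injEq]
    refine ⟨by ring, ?_⟩
    by_cases he : ((PySem.Str.split₀ (PySem.List.pyGetD lines i "")).filter
        (fun x => PySem.Str.strIsdigit x)) = []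
    · simp only [he, List.isEmpty_nil, List.map_nil, if_true, ne_eq, not_true_eq_false, if_false]
      ring
    · rw [if_neg (by simpa [List.isEmpty_iff] using he), if_pos (by simpa using he)]
      ring
  termination_by ((lines.length : Int) - i).toNat
  decreasing_by omega

-- ===== VERDICT (by name: the statement is the Claim_ definition above) =====
theorem count_file_spec : Claim_equal_count_file := by
  intro lines i _ _
  unfold Spec_count_file count_file_alt
  by_cases h : lines = []
  · subst h
    rw [count_file]
    simp
  · rw [if_neg h, cf_main lines h i 0 0]
    simp
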